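-- pv_equiv track=rewrite | github.com/pabloschwarzenberg/grader | hito2_ej3/hito2_ej3_555e4d00ebb62a247b47a71ff16c03d9.py | encontrar_subsecuencias_unicas
-- ===== SOURCE A (Python) =====
-- def encontrar_subsecuencias_unicas(secuencia, n):
--     subsecuencias = set()
--     subsecuencias_unicas = set()
--
--     for i in range(len(secuencia) - n + 1):
--         subsecuencia = secuencia[i:i+n]
--         if subsecuencia in subsecuencias:
--             subsecuencias_unicas.discard(subsecuencia)
--         else:
--             subsecuencias.add(subsecuencia)
--             subsecuencias_unicas.add(subsecuencia)
--
--     return subsecuencias_unicas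
-- ===== SOURCE B (Python) =====
-- def encontrar_subsecuencias_unicas(secuencia, n):
--     # count-then-filter: tally every length-n slice, keep those seen exactly once
--     subs = [secuencia[i:i+n] for i in range(len(secuencia) - n + 1)]
--     counts = {}
--     for s in subs:
--         counts[s] = counts.get(s, 0) + 1
--     return {s for s, c in counts.items() if c == 1}
-- ===== Notes on version B (the rewrite author's own statement) =====
-- stated objective: simpler
-- what changed: Replaces A's incremental two-set add/discard bookkeeping with a two-phase count-then-filter: build a frequency dict of all length-n slices, then keep the slices counted exactly once.
import Mathlib
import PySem

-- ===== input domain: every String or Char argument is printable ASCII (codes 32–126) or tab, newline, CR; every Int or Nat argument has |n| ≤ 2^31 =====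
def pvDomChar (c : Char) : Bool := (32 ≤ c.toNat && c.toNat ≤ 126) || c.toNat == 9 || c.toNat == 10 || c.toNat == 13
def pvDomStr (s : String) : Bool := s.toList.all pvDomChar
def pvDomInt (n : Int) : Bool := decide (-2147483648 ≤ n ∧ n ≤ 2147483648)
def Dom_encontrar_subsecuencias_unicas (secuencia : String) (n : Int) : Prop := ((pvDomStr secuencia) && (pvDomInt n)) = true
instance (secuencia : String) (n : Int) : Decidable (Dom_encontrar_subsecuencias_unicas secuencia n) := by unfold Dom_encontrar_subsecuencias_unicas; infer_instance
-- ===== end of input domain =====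

-- B replaces A's incremental add/discard bookkeeping across two sets by a count-then-filter
-- decomposition (tally every slice, then keep the ones counted once); objective: simpler.

-- ===== PORT A =====
-- two set variables become a pair state threaded through the loop
def encontrar_subsecuencias_unicas (secuencia : String) (n : Int) : List String :=
  ((PySem.List.pyRange 0 (PySem.Str.len secuencia - n + 1) 1).foldl
    (fun (st : PySem.Set String × PySem.Set String) i =>
      let subsecuencia := PySem.Str.slice secuencia (some i) (some (i + n))
      if PySem.Set.contains st.1 subsecuencia then
        (st.1, PySem.Set.discard st.2 subsecuencia)
      else
        (PySem.Set.add st.1 subsecuencia, PySem.Set.add st.2 subsecuencia))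
    (PySem.Set.empty, PySem.Set.empty)).2

-- ===== PORT B =====
def encontrar_subsecuencias_unicas_alt (secuencia : String) (n : Int) : List String :=
  let subs := (PySem.List.pyRange 0 (PySem.Str.len secuencia - n + 1) 1).map
      (fun i => PySem.Str.slice secuencia (some i) (some (i + n)))
  let counts := subs.foldl (fun (d : PySem.Dict String Int) s => d.insert s (d.getD s 0 + 1))
      PySem.Dict.empty
  PySem.Set.ofList ((counts.items.filter (fun p => p.2 == 1)).map Prod.fst)

-- ===== PRECONDITION & SPEC =====
def Spec_encontrar_subsecuencias_unicas (secuencia : String) (n : Int) (out : List String) : Prop := out = encontrar_subsecuencias_unicas_alt secuencia n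
instance (secuencia : String) (n : Int) (out : List String) : Decidable (Spec_encontrar_subsecuencias_unicas secuencia n out) := by unfold Spec_encontrar_subsecuencias_unicas; infer_instance

-- ===== CLAIM (what is proved, stated in full; the proofs are below) =====
def Claim_equal_encontrar_subsecuencias_unicas : Prop := ∀ (secuencia : String) (n : Int), Dom_encontrar_subsecuencias_unicas secuencia n → Spec_encontrar_subsecuencias_unicas secuencia n (encontrar_subsecuencias_unicas secuencia n)

-- ===== LEMMAS AND PROOFS =====

-- A's loop, over an arbitrary list of slices: seen = set(xs), uniques = the elements counted once
theorem pv_fold_eq (xs : List String) :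
    xs.foldl
      (fun (st : PySem.Set String × PySem.Set String) x =>
        if PySem.Set.contains st.1 x then (st.1, PySem.Set.discard st.2 x)
        else (PySem.Set.add st.1 x, PySem.Set.add st.2 x))
      (PySem.Set.empty, PySem.Set.empty)
    = (PySem.Set.ofList xs,
       (PySem.Set.ofList xs).filter (fun k => ((List.count k xs : Int) == 1))) := by
  induction xs using List.reverseRecOn with
  | nil => rfl
  | append_singleton xs x ih =>
    rw [List.foldl_append, ih]
    simp only [List.foldl_cons, List.foldl_nil]
    by_cases hx : x ∈ xs
    · rw [if_pos ((PySem.Set.contains_iff _ _).mpr ((PySem.Set.mem_ofList xs x).mpr hx))]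
      rw [PySem.Set.ofList_append_singleton,
        PySem.Set.add_of_mem ((PySem.Set.mem_ofList xs x).mpr hx)]
      simp only [Prod.mk.injEq, true_and]
      simp only [PySem.Set.discard, List.filter_filter]
      refine List.filter_congr ?_
      intro k hk
      have hkxs : k ∈ xs := (PySem.Set.mem_ofList xs k).mp hk
      by_cases hkx : k = x
      · subst hkx
        have h1 : 1 ≤ List.count k xs := List.count_pos_iff.mpr hkxs
        simp only [List.count_append, List.count_singleton, beq_self_eq_true]
        have : ¬ ((List.count k xs : Int) + 1 = 1) := by omega
        simp [this]
      · have hxk : ¬ x = k := fun h => hkx h.symm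
        have : List.count k (xs ++ [x]) = List.count k xs := by
          simp [List.count_append, hxk]
        rw [this]
        simp [hkx]
    · have hnm : x ∉ PySem.Set.ofList xs := fun h => hx ((PySem.Set.mem_ofList xs x).mp h)
      rw [if_neg (fun h => hnm ((PySem.Set.contains_iff _ _).mp h))]
      rw [PySem.Set.ofList_append_singleton, PySem.Set.add_of_not_mem hnm]
      simp only [Prod.mk.injEq, true_and]
      have hnf : x ∉ (PySem.Set.ofList xs).filter (fun k => ((List.count k xs : Int) == 1)) :=
        fun h => hnm (List.mem_of_mem_filter h)
      rw [PySem.Set.add_of_not_mem hnf, List.filter_append]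
      have h0 : List.count x xs = 0 := List.count_eq_zero.mpr hx
      have hfx : List.filter (fun k => ((List.count k (xs ++ [x]) : Int) == 1)) [x] = [x] := by
        simp [List.count_append, h0]
      rw [hfx]
      congr 1
      refine List.filter_congr ?_
      intro k hk
      have hkxs : k ∈ xs := (PySem.Set.mem_ofList xs k).mp hk
      have hkx : k ≠ x := fun h => hx (h ▸ hkxs)
      have hxk : x ≠ k := fun h => hkx h.symm
      simp only [List.count_append, List.count_singleton', if_neg hxk]
      simp

-- B's count-then-filter pipeline, over the same list of slices, computes the same list
theorem pv_alt_eq (xs : List String) :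
    PySem.Set.ofList
      (((xs.foldl (fun (d : PySem.Dict String Int) s => d.insert s (d.getD s 0 + 1))
          PySem.Dict.empty).items.filter (fun p => p.2 == 1)).map Prod.fst)
    = (PySem.Set.ofList xs).filter (fun k => ((List.count k xs : Int) == 1)) := by
  rw [PySem.Dict.foldl_insert_getD_add_one_eq_counter, PySem.Dict.items_counter,
    List.filter_map, List.map_map]
  have h1 : (Prod.fst ∘ fun k => (k, (List.count k xs : Int))) = id := rfl
  have h2 : ((fun (p : String × Int) => p.2 == 1) ∘ fun k => (k, (List.count k xs : Int)))
      = fun k => ((List.count k xs : Int) == 1) := rfl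
  rw [h1, h2, List.map_id]
  exact PySem.Set.ofList_eq_self_of_nodup _
    ((PySem.Set.nodup_ofList xs).filter _)

-- ===== VERDICT (by name: the statement is the Claim_ definition above) =====
theorem encontrar_subsecuencias_unicas_spec : Claim_equal_encontrar_subsecuencias_unicas := by
  intro secuencia n _
  unfold Spec_encontrar_subsecuencias_unicas
  have h1 := pv_fold_eq ((PySem.List.pyRange 0 (PySem.Str.len secuencia - n + 1) 1).map
      (fun i => PySem.Str.slice secuencia (some i) (some (i + n))))
  rw [List.foldl_map] at h1
  have h2 := pv_alt_eq ((PySem.List.pyRange 0 (PySem.Str.len secuencia - n + 1) 1).map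
      (fun i => PySem.Str.slice secuencia (some i) (some (i + n))))
  exact (congrArg Prod.snd h1).trans h2.symm
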